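-- pv_equiv track=rewrite | github.com/Bankster812/test | neuromorphic/safety/constraints.py | violation_type
-- ===== SOURCE A (Python) =====
-- def violation_type(violations: list[str]) -> str:
--     """
--     Return the primary violation type for reflex lookup.
--     Priority: collision > force > velocity > joint_limit.
--     """
--     for v in violations:
--         if v.startswith("collision"):
--             return "collision"
--     for v in violations:
--         if v.startswith("force"):
--             return "force_limit"
--     for v in violations:
--         if v.startswith("velocity"):
--             return "velocity_limit"
--     return "joint_limit"
-- ===== SOURCE B (Python) =====
-- def violation_type(violations: list[str]) -> str:
--     """Single pass: track the smallest priority rank seen; map it back to a label."""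
--     best = 3
--     for v in violations:
--         if v.startswith("collision"):
--             return "collision"
--         elif v.startswith("force"):
--             r = 1
--         elif v.startswith("velocity"):
--             r = 2
--         else:
--             r = 3
--         if r < best:
--             best = r
--     return ("collision", "force_limit", "velocity_limit", "joint_limit")[best]
-- ===== Notes on version B (the rewrite author's own statement) =====
-- stated objective: alternative
-- what changed: Replaces A's three sequential scans of the list by a single traversal that keeps the minimum priority rank seen (with early exit on a collision prefix) and maps the final rank back to its label.
import Mathlib
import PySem

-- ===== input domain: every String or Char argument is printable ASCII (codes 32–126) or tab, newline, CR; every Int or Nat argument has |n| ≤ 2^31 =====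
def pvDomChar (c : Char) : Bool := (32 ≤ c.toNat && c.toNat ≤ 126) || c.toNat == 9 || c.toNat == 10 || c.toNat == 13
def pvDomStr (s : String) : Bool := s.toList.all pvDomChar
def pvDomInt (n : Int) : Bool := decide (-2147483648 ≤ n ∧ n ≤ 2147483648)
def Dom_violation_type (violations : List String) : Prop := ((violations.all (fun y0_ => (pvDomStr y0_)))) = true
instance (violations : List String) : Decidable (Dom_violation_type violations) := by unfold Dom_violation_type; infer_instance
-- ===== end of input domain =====

-- B replaces A's three sequential prefix scans with one single-pass minimum-rank loop; objective: alternative (same cost, one traversal).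

-- ===== PORT A =====
-- first 'for' loop of A: early return "collision" on a "collision" prefix
def vtLoop1 : List String → Option String
  | [] => none
  | v :: t => if PySem.Str.startswith v "collision" then some "collision" else vtLoop1 t

-- second 'for' loop of A
def vtLoop2 : List String → Option String
  | [] => none
  | v :: t => if PySem.Str.startswith v "force" then some "force_limit" else vtLoop2 t

-- third 'for' loop of A
def vtLoop3 : List String → Option String
  | [] => none
  | v :: t => if PySem.Str.startswith v "velocity" then some "velocity_limit" else vtLoop3 t

def violation_type (violations : List String) : String :=
  match vtLoop1 violations with
  | some s => s
  | none =>
    match vtLoop2 violations with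
    | some s => s
    | none =>
      match vtLoop3 violations with
      | some s => s
      | none => "joint_limit"

-- ===== PORT B =====
-- the final tuple indexing of Source B
def vtLabel (best : Nat) : String :=
  if best = 0 then "collision"
  else if best = 1 then "force_limit"
  else if best = 2 then "velocity_limit"
  else "joint_limit"

-- Source B's single loop, carrying 'best'
def vtAltLoop : List String → Nat → String
  | [], best => vtLabel best
  | v :: t, best =>
    if PySem.Str.startswith v "collision" then "collision"
    else
      let r : Nat :=
        if PySem.Str.startswith v "force" then 1
        else if PySem.Str.startswith v "velocity" then 2
        else 3
      vtAltLoop t (if r < best then r else best)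

def violation_type_alt (violations : List String) : String :=
  vtAltLoop violations 3

-- ===== PRECONDITION & SPEC =====
def Spec_violation_type (violations : List String) (out : String) : Prop := out = violation_type_alt violations
instance (violations : List String) (out : String) : Decidable (Spec_violation_type violations out) := by unfold Spec_violation_type; infer_instance

-- ===== CLAIM (what is proved, stated in full; the proofs are below) =====
def Claim_equal_violation_type : Prop := ∀ (violations : List String), Dom_violation_type violations → Spec_violation_type violations (violation_type violations)

-- ===== LEMMAS AND PROOFS =====

def vtRank (v : String) : Nat :=
  if PySem.Str.startswith v "collision" then 0
  else if PySem.Str.startswith v "force" then 1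
  else if PySem.Str.startswith v "velocity" then 2
  else 3

def vtMinRank : List String → Nat
  | [] => 3
  | v :: t => min (vtRank v) (vtMinRank t)

theorem vtAltLoop_eq (vs : List String) : ∀ best, vtAltLoop vs best = vtLabel (min best (vtMinRank vs)) := by
  induction vs with
  | nil =>
    intro best
    show vtLabel best = vtLabel (min best 3)
    unfold vtLabel
    split_ifs <;> first | rfl | omega
  | cons v t ih =>
    intro best
    rcases Bool.eq_false_or_eq_true (PySem.Str.startswith v "collision") with hc | hc
    · have h0 : min best (vtMinRank (v :: t)) = 0 := by
        show min best (min (vtRank v) (vtMinRank t)) = 0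
        unfold vtRank
        rw [hc, if_pos rfl]
        omega
      rw [h0]
      simp only [vtAltLoop, hc, if_true]
      rfl
    · have hr : (if PySem.Str.startswith v "force" = true then 1
          else if PySem.Str.startswith v "velocity" = true then 2 else 3) = vtRank v := by
        unfold vtRank
        rw [hc, if_neg (by decide : ¬(false = true))]
      simp only [vtAltLoop, hc, Bool.false_eq_true, if_false, ih, hr]
      congr 1
      show min (if vtRank v < best then vtRank v else best) (vtMinRank t)
          = min best (min (vtRank v) (vtMinRank t))
      split_ifs <;> omega

theorem vtLoop1_eq (vs : List String) :
    vtLoop1 vs = if vs.any (fun v => PySem.Str.startswith v "collision") then some "collision" else none := by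
  induction vs with
  | nil => rfl
  | cons v t ih =>
    simp only [vtLoop1, List.any_cons, ih]
    rcases Bool.eq_false_or_eq_true (PySem.Str.startswith v "collision") with h | h
    · simp only [h]
      rfl
    · simp only [h]
      rfl

theorem vtLoop2_eq (vs : List String) :
    vtLoop2 vs = if vs.any (fun v => PySem.Str.startswith v "force") then some "force_limit" else none := by
  induction vs with
  | nil => rfl
  | cons v t ih =>
    simp only [vtLoop2, List.any_cons, ih]
    rcases Bool.eq_false_or_eq_true (PySem.Str.startswith v "force") with h | h
    · simp only [h]
      rfl
    · simp only [h]
      rfl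

theorem vtLoop3_eq (vs : List String) :
    vtLoop3 vs = if vs.any (fun v => PySem.Str.startswith v "velocity") then some "velocity_limit" else none := by
  induction vs with
  | nil => rfl
  | cons v t ih =>
    simp only [vtLoop3, List.any_cons, ih]
    rcases Bool.eq_false_or_eq_true (PySem.Str.startswith v "velocity") with h | h
    · simp only [h]
      rfl
    · simp only [h]
      rfl

theorem vtMinRank_char (vs : List String) :
    vtMinRank vs =
      if vs.any (fun v => PySem.Str.startswith v "collision") then 0
      else if vs.any (fun v => PySem.Str.startswith v "force") then 1
      else if vs.any (fun v => PySem.Str.startswith v "velocity") then 2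
      else 3 := by
  induction vs with
  | nil => rfl
  | cons v t ih =>
    simp only [vtMinRank, vtRank, ih, List.any_cons]
    rcases Bool.eq_false_or_eq_true (PySem.Str.startswith v "collision") with hc | hc <;>
      rcases Bool.eq_false_or_eq_true (PySem.Str.startswith v "force") with hf | hf <;>
        rcases Bool.eq_false_or_eq_true (PySem.Str.startswith v "velocity") with hv | hv <;>
          simp only [hc, hf, hv, Bool.false_or, Bool.true_or] <;>
            split_ifs <;> first | contradiction | omega

-- ===== VERDICT (by name: the statement is the Claim_ definition above) =====
theorem violation_type_spec : Claim_equal_violation_type := by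
  intro vs _
  unfold Spec_violation_type violation_type violation_type_alt
  rw [vtAltLoop_eq, vtLoop1_eq, vtLoop2_eq, vtLoop3_eq, vtMinRank_char]
  split_ifs <;> norm_num [vtLabel]
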